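-- pv_equiv track=rewrite | github.com/lczyk/libreviz | src/boxes/colors.py | _init_standard_colors_matrix
-- ===== SOURCE A (Python) =====
-- ColorName = str
--
-- ColorIJ = tuple[int, int]
--
-- ColorRGB = tuple[int, int, int]  # RGB color as a tuple of (R, G, B) values
--
-- def _init_standard_colors_matrix(
--     _in: dict[ColorName, tuple[ColorIJ, ColorRGB]],
-- ) -> list[list[tuple[ColorName, ColorRGB]]]:
--     """Initialize the standard colors matrix."""
--     max_cj, max_ci = 0, 0
--     for ij, _ in _in.values():
--         ci, cj = ij
--         max_cj = max(max_cj, cj)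
--         max_ci = max(max_ci, ci)
--
--     out: list[list[tuple[ColorName, ColorRGB]]] = [
--         [("no_fill", (-1, -1, -1))] * (max_ci + 1)  # Initialize with 'No Fill' color
--         for _ in range(max_cj + 1)
--     ]
--
--     for name, (ij, rgb) in _in.items():
--         ci, cj = ij
--         if cj < 0 or cj > max_cj or ci < 0 or ci > max_ci:
--             raise ValueError(f"Invalid indices ({ci}, {cj}) for color {name}")
--         out[cj][ci] = (name, rgb)
--
--     return out
-- ===== SOURCE B (Python) =====
-- def _init_standard_colors_matrix(_in):
--     """Initialize the standard colors matrix."""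
--     pos = {}
--     max_ci, max_cj = 0, 0
--     for name, (ij, rgb) in _in.items():
--         ci, cj = ij
--         if ci < 0 or cj < 0:
--             raise ValueError(f"Invalid indices ({ci}, {cj}) for color {name}")
--         pos[(ci, cj)] = (name, rgb)
--         if ci > max_ci:
--             max_ci = ci
--         if cj > max_cj:
--             max_cj = cj
--     return [
--         [pos.get((ci, cj), ("no_fill", (-1, -1, -1))) for ci in range(max_ci + 1)]
--         for cj in range(max_cj + 1)
--     ]
-- ===== Notes on version B (the rewrite author's own statement) =====
-- stated objective: alternative
-- what changed: Instead of allocating a default grid and scattering colors into it in a second pass over the dict, B makes one pass that records each color in a position-keyed dict while tracking the maxima, then builds the grid by sweeping every output cell and looking it up (the same ValueError is raised inside that single pass).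
import Mathlib
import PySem

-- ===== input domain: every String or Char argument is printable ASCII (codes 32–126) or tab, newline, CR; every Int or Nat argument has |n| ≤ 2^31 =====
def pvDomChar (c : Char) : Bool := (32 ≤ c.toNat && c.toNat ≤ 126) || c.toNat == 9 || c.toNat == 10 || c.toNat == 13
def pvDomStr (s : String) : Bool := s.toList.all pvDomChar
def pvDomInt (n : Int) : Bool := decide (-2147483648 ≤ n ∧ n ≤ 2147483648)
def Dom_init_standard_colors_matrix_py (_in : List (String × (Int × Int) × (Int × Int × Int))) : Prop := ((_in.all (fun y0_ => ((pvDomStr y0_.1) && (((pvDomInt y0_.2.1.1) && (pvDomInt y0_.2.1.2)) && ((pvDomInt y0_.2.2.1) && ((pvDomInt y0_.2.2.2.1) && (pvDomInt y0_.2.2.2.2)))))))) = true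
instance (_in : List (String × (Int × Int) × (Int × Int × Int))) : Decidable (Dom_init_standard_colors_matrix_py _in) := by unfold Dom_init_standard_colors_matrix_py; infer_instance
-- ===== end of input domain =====

-- B replaces A's allocate-then-scatter with a single indexing pass into a position-keyed dict
-- followed by a grid-lookup sweep over every output cell; same outputs (alternative decomposition, no speed claim).

-- ===== PORT A =====
-- first loop: max_cj, max_ci over _in.values()
def pvMaxesA (l : List (String × (Int × Int) × (Int × Int × Int))) : Int × Int :=
  l.foldl (fun m e => (max m.1 e.2.1.2, max m.2 e.2.1.1)) (0, 0)

-- second loop: out[cj][ci] = (name, rgb); Python raises ValueError on the guard (excluded by Pre_)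
def pvScatterA (mcj mci : Int) (l : List (String × (Int × Int) × (Int × Int × Int)))
    (grid : List (List (String × (Int × Int × Int)))) : List (List (String × (Int × Int × Int))) :=
  l.foldl (fun out e =>
    if e.2.1.2 < 0 ∨ mcj < e.2.1.2 ∨ e.2.1.1 < 0 ∨ mci < e.2.1.1 then out
    else out.modify e.2.1.2.toNat (fun row => row.set e.2.1.1.toNat (e.1, e.2.2))) grid

def init_standard_colors_matrix_py (_in : List (String × (Int × Int) × (Int × Int × Int))) : List (List (String × (Int × Int × Int))) :=
  pvScatterA (pvMaxesA _in).1 (pvMaxesA _in).2 _in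
    ((List.range ((pvMaxesA _in).1 + 1).toNat).map
      (fun _ => List.replicate ((pvMaxesA _in).2 + 1).toNat ("no_fill", (-1, -1, -1))))

-- ===== PORT B =====
-- ===== PORT B =====
-- single pass: (pos, max_ci, max_cj); Python raises ValueError on the guard (excluded by Pre_)
def pvIndexB (l : List (String × (Int × Int) × (Int × Int × Int))) :
    PySem.Dict (Int × Int) (String × (Int × Int × Int)) × Int × Int :=
  l.foldl (fun st e =>
    if e.2.1.1 < 0 ∨ e.2.1.2 < 0 then st
    else (st.1.insert (e.2.1.1, e.2.1.2) (e.1, e.2.2),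
          (if st.2.1 < e.2.1.1 then e.2.1.1 else st.2.1),
          (if st.2.2 < e.2.1.2 then e.2.1.2 else st.2.2)))
   (PySem.Dict.empty, 0, 0)

def init_standard_colors_matrix_py_alt (_in : List (String × (Int × Int) × (Int × Int × Int))) : List (List (String × (Int × Int × Int))) :=
  (PySem.List.pyRange 0 ((pvIndexB _in).2.2 + 1) 1).map (fun cj =>
    (PySem.List.pyRange 0 ((pvIndexB _in).2.1 + 1) 1).map (fun ci =>
      (pvIndexB _in).1.getD (ci, cj) ("no_fill", (-1, -1, -1))))

-- ===== PRECONDITION & SPEC =====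
-- ===== PRECONDITION & SPEC =====
-- Pre_ excludes exactly the inputs with a negative ci or cj, on which the Python raises ValueError.
def Pre_init_standard_colors_matrix_py (_in : List (String × (Int × Int) × (Int × Int × Int))) : Prop :=
  ∀ e ∈ _in, 0 ≤ e.2.1.1 ∧ 0 ≤ e.2.1.2
instance (_in : List (String × (Int × Int) × (Int × Int × Int))) : Decidable (Pre_init_standard_colors_matrix_py _in) := by unfold Pre_init_standard_colors_matrix_py; infer_instance
def pvWitness_init_standard_colors_matrix_py : (List (String × (Int × Int) × (Int × Int × Int))) :=
  [("red", (1, 0), (255, 0, 0)), ("blue", (0, 1), (0, 0, 255))]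

def Spec_init_standard_colors_matrix_py (_in : List (String × (Int × Int) × (Int × Int × Int))) (out : List (List (String × (Int × Int × Int)))) : Prop := out = init_standard_colors_matrix_py_alt _in
instance (_in : List (String × (Int × Int) × (Int × Int × Int))) (out : List (List (String × (Int × Int × Int)))) : Decidable (Spec_init_standard_colors_matrix_py _in out) := by unfold Spec_init_standard_colors_matrix_py; infer_instance

-- ===== CLAIM (what is proved, stated in full; the proofs are below) =====
def Claim_equal_init_standard_colors_matrix_py : Prop := ∀ (_in : List (String × (Int × Int) × (Int × Int × Int))), Dom_init_standard_colors_matrix_py _in → Pre_init_standard_colors_matrix_py _in → Spec_init_standard_colors_matrix_py _in (init_standard_colors_matrix_py _in)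


-- proof-side abbreviation: the dict part of B's fold, started from any dict
def pvDict (l : List (String × (Int × Int) × (Int × Int × Int)))
    (d : PySem.Dict (Int × Int) (String × (Int × Int × Int))) : PySem.Dict (Int × Int) (String × (Int × Int × Int)) :=
  l.foldl (fun d e => d.insert (e.2.1.1, e.2.1.2) (e.1, e.2.2)) d

-- the A-side max fold from an arbitrary start
def pvMaxF (l : List (String × (Int × Int) × (Int × Int × Int))) (m : Int × Int) : Int × Int :=
  l.foldl (fun m e => (max m.1 e.2.1.2, max m.2 e.2.1.1)) m

lemma pvMaxesA_eq (l) : pvMaxesA l = pvMaxF l (0, 0) := rfl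

lemma pvIndexB_eq (l : List (String × (Int × Int) × (Int × Int × Int)))
    (h : ∀ e ∈ l, 0 ≤ e.2.1.1 ∧ 0 ≤ e.2.1.2) :
    ∀ d (a b : Int),
      l.foldl (fun st e =>
        if e.2.1.1 < 0 ∨ e.2.1.2 < 0 then st
        else (st.1.insert (e.2.1.1, e.2.1.2) (e.1, e.2.2),
              (if st.2.1 < e.2.1.1 then e.2.1.1 else st.2.1),
              (if st.2.2 < e.2.1.2 then e.2.1.2 else st.2.2))) (d, a, b)
      = (pvDict l d, (pvMaxF l (b, a)).2, (pvMaxF l (b, a)).1) := by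
  induction l with
  | nil => intro d a b; simp [pvDict, pvMaxF]
  | cons e l ih =>
    intro d a b
    have he := h e (List.mem_cons_self ..)
    have h' : ∀ e' ∈ l, 0 ≤ e'.2.1.1 ∧ 0 ≤ e'.2.1.2 := fun e' he' => h e' (List.mem_cons_of_mem _ he')
    have hg : ¬ (e.2.1.1 < 0 ∨ e.2.1.2 < 0) := by omega
    have h1 : (if a < e.2.1.1 then e.2.1.1 else a) = max a e.2.1.1 := by
      rcases lt_or_ge a e.2.1.1 with hc | hc
      · simp [hc, max_eq_right hc.le]
      · simp [not_lt.2 hc, max_eq_left hc]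
    have h2 : (if b < e.2.1.2 then e.2.1.2 else b) = max b e.2.1.2 := by
      rcases lt_or_ge b e.2.1.2 with hc | hc
      · simp [hc, max_eq_right hc.le]
      · simp [not_lt.2 hc, max_eq_left hc]
    rw [List.foldl_cons, if_neg hg, h1, h2, ih h']
    simp [pvDict, pvMaxF]

lemma pvMaxF_mono (l : List (String × (Int × Int) × (Int × Int × Int))) :
    ∀ m : Int × Int, m.1 ≤ (pvMaxF l m).1 ∧ m.2 ≤ (pvMaxF l m).2 := by
  induction l with
  | nil => intro m; simp [pvMaxF]
  | cons e l ih =>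
    intro m
    have := ih (max m.1 e.2.1.2, max m.2 e.2.1.1)
    constructor
    · exact le_trans (le_max_left _ _) (by simpa [pvMaxF] using this.1)
    · exact le_trans (le_max_left _ _) (by simpa [pvMaxF] using this.2)

lemma pvMaxF_bound (l : List (String × (Int × Int) × (Int × Int × Int))) :
    ∀ (m : Int × Int) (e) (_ : e ∈ l), e.2.1.2 ≤ (pvMaxF l m).1 ∧ e.2.1.1 ≤ (pvMaxF l m).2 := by
  induction l with
  | nil => intro _ e he; cases he
  | cons e' l ih =>
    intro m e he
    rcases List.mem_cons.1 he with rfl | he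
    · have := pvMaxF_mono l (max m.1 e.2.1.2, max m.2 e.2.1.1)
      constructor
      · exact le_trans (le_max_right _ _) (by simpa [pvMaxF] using this.1)
      · exact le_trans (le_max_right _ _) (by simpa [pvMaxF] using this.2)
    · have := ih (max m.1 e'.2.1.2, max m.2 e'.2.1.1) e he
      exact ⟨by simpa [pvMaxF] using this.1, by simpa [pvMaxF] using this.2⟩

-- shape of a grid
def pvShape (g : List (List (String × (Int × Int × Int)))) (Rr Cc : Nat) : Prop :=
  g.length = Rr ∧ ∀ j (hj : j < g.length), (g[j]'hj).length = Cc

def pvCell? (g : List (List (String × (Int × Int × Int)))) (j i : Nat) : Option (String × (Int × Int × Int)) :=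
  (g[j]?).bind (fun r => r[i]?)

lemma pvShape_modify_set (g : List (List (String × (Int × Int × Int)))) (Rr Cc a b : Nat) (v)
    (hg : pvShape g Rr Cc) : pvShape (g.modify a (fun r => r.set b v)) Rr Cc := by
  refine ⟨by simpa using hg.1, ?_⟩
  intro j hj
  rw [List.getElem_modify]
  split
  · simpa using hg.2 j (by simpa using hj)
  · exact hg.2 j (by simpa using hj)

lemma pvCell?_modify_set (g : List (List (String × (Int × Int × Int)))) (a b : Nat) (v)
    (ha : a < g.length) (hb : b < (g[a]'ha).length) (j i : Nat) :
    pvCell? (g.modify a (fun r => r.set b v)) j i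
      = if a = j ∧ b = i then some v else pvCell? g j i := by
  unfold pvCell?
  rw [List.getElem?_modify]
  by_cases hj : a = j
  · subst hj
    rw [List.getElem?_eq_getElem ha]
    simp only [Option.bind_some]
    by_cases hi : b = i
    · subst hi
      simp [hb]
    · simp [hi]
  · simp only [hj, if_false]
    cases hgj : g[j]? with
    | none => simp
    | some r => simp

lemma pvScatter_cons (mcj mci : Int) (e) (l) (g) :
    pvScatterA mcj mci (e :: l) g
      = pvScatterA mcj mci l
          (if e.2.1.2 < 0 ∨ mcj < e.2.1.2 ∨ e.2.1.1 < 0 ∨ mci < e.2.1.1 then g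
           else g.modify e.2.1.2.toNat (fun row => row.set e.2.1.1.toNat (e.1, e.2.2))) := by
  simp [pvScatterA]

lemma pvScatter_shape (mcj mci : Int) (Rr Cc : Nat) (l) :
    ∀ g, pvShape g Rr Cc → pvShape (pvScatterA mcj mci l g) Rr Cc := by
  induction l with
  | nil => intro g hg; simpa [pvScatterA] using hg
  | cons e l ih =>
    intro g hg
    rw [pvScatter_cons]
    apply ih
    split
    · exact hg
    · exact pvShape_modify_set _ _ _ _ _ _ hg

lemma pvScatter_cell (mcj mci : Int) (Rr Cc : Nat)
    (hR : Rr = (mcj + 1).toNat) (hC : Cc = (mci + 1).toNat) (l)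
    (hb : ∀ e ∈ l, 0 ≤ e.2.1.1 ∧ e.2.1.1 ≤ mci ∧ 0 ≤ e.2.1.2 ∧ e.2.1.2 ≤ mcj) :
    ∀ g, pvShape g Rr Cc → ∀ (j i : Nat),
      pvCell? (pvScatterA mcj mci l g) j i
        = ((pvDict l PySem.Dict.empty).get? ((i : Int), (j : Int))).or (pvCell? g j i) := by
  induction l using List.reverseRecOn with
  | nil => intro g hg j i; simp [pvScatterA, pvDict, pvCell?]
  | append_singleton l e ih =>
    intro g hg j i
    have hbe := hb e (by simp)
    have hbl : ∀ e' ∈ l, 0 ≤ e'.2.1.1 ∧ e'.2.1.1 ≤ mci ∧ 0 ≤ e'.2.1.2 ∧ e'.2.1.2 ≤ mcj :=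
      fun e' he' => hb e' (by simp [he'])
    have hg' := pvScatter_shape mcj mci Rr Cc l g hg
    have hstep : pvScatterA mcj mci (l ++ [e]) g
        = (pvScatterA mcj mci l g).modify e.2.1.2.toNat (fun row => row.set e.2.1.1.toNat (e.1, e.2.2)) := by
      simp only [pvScatterA, List.foldl_append, List.foldl_cons, List.foldl_nil]
      rw [if_neg (by omega)]
    have hdict : pvDict (l ++ [e]) PySem.Dict.empty
        = (pvDict l PySem.Dict.empty).insert (e.2.1.1, e.2.1.2) (e.1, e.2.2) := by
      simp [pvDict]
    have ha : e.2.1.2.toNat < (pvScatterA mcj mci l g).length := by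
      rw [hg'.1, hR]; omega
    have hbcol : e.2.1.1.toNat < ((pvScatterA mcj mci l g)[e.2.1.2.toNat]'ha).length := by
      rw [hg'.2 _ ha, hC]; omega
    rw [hstep, pvCell?_modify_set _ _ _ _ ha hbcol, hdict]
    by_cases hkey : e.2.1.2.toNat = j ∧ e.2.1.1.toNat = i
    · have hik : ((i : Int), (j : Int)) = (e.2.1.1, e.2.1.2) := by
        obtain ⟨h1, h2⟩ := hkey
        have e1 : (i : Int) = e.2.1.1 := by omega
        have e2 : (j : Int) = e.2.1.2 := by omega
        rw [Prod.mk.injEq]; exact ⟨e1, e2⟩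
      rw [if_pos hkey, hik, PySem.Dict.get?_insert_self]
      simp
    · have hik : ((i : Int), (j : Int)) ≠ (e.2.1.1, e.2.1.2) := by
        intro hcontra
        apply hkey
        rw [Prod.ext_iff] at hcontra
        constructor <;> omega
      rw [if_neg hkey, PySem.Dict.get?_insert_of_ne _ _ hik, ih hbl g hg j i]

lemma pvCell?_eq_some (g : List (List (String × (Int × Int × Int)))) (j i : Nat)
    (hj : j < g.length) (hi : i < (g[j]'hj).length) :
    pvCell? g j i = some ((g[j]'hj)[i]'hi) := by
  simp [pvCell?, List.getElem?_eq_getElem hj, List.getElem?_eq_getElem hi]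

-- ===== VERDICT (by name: the statement is the Claim_ definition above) =====
theorem init_standard_colors_matrix_py_spec : Claim_equal_init_standard_colors_matrix_py := by
  intro _in _ hpre
  unfold Spec_init_standard_colors_matrix_py
  unfold init_standard_colors_matrix_py init_standard_colors_matrix_py_alt
  have hIdx : pvIndexB _in = (pvDict _in PySem.Dict.empty, (pvMaxF _in (0, 0)).2, (pvMaxF _in (0, 0)).1) := by
    unfold pvIndexB
    exact pvIndexB_eq _in hpre PySem.Dict.empty 0 0
  rw [pvMaxesA_eq, hIdx]
  dsimp only
  set M := pvMaxF _in (0, 0) with hM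
  set d := pvDict _in PySem.Dict.empty with hd
  have hM1 : 0 ≤ M.1 := (pvMaxF_mono _in (0, 0)).1
  have hM2 : 0 ≤ M.2 := (pvMaxF_mono _in (0, 0)).2
  set R := (M.1 + 1).toNat with hR
  set C := (M.2 + 1).toNat with hC
  set grid0 := (List.range R).map (fun _ => List.replicate C (("no_fill", (-1, -1, -1)) : String × (Int × Int × Int))) with hg0
  have hshape0 : pvShape grid0 R C := by
    constructor
    · simp [hg0]
    · intro j hj; simp [hg0]
  have hshapeA := pvScatter_shape M.1 M.2 R C _in grid0 hshape0
  have hb : ∀ e ∈ _in, 0 ≤ e.2.1.1 ∧ e.2.1.1 ≤ M.2 ∧ 0 ≤ e.2.1.2 ∧ e.2.1.2 ≤ M.1 := by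
    intro e he
    have h1 := hpre e he
    have h2 := pvMaxF_bound _in (0, 0) e he
    exact ⟨h1.1, h2.2, h1.2, h2.1⟩
  have hcell := pvScatter_cell M.1 M.2 R C hR hC _in hb grid0 hshape0
  apply List.ext_getElem
  · rw [hshapeA.1]
    simp only [List.length_map, PySem.List.length_pyRange_one]
    omega
  · intro j hj hj'
    have hjR : j < R := by rw [← hshapeA.1]; exact hj
    apply List.ext_getElem
    · rw [hshapeA.2 j hj, List.getElem_map, List.length_map,
        PySem.List.length_pyRange_one]
      omega
    · intro i hi hi'
      have hiC : i < C := by rw [← hshapeA.2 j hj]; exact hi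
      -- A side
      have hA := pvCell?_eq_some _ j i hj hi
      rw [hcell j i] at hA
      have hg0cell : pvCell? grid0 j i = some ("no_fill", (-1, -1, -1)) := by
        rw [pvCell?_eq_some grid0 j i (by rw [hshape0.1]; exact hjR)
          (by rw [hshape0.2 j (by rw [hshape0.1]; exact hjR)]; exact hiC)]
        simp [hg0]
      rw [hg0cell] at hA
      have hAval : (pvScatterA M.1 M.2 _in grid0)[j][i] = d.getD ((i : Int), (j : Int)) ("no_fill", (-1, -1, -1)) := by
        cases hget : d.get? ((i : Int), (j : Int)) with
        | none =>
          rw [hget] at hA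
          simp only [Option.none_or, Option.some.injEq] at hA
          rw [← hA]
          simp [PySem.Dict.getD, hget]
        | some v =>
          rw [hget] at hA
          simp only [Option.some_or, Option.some.injEq] at hA
          rw [← hA]
          simp [PySem.Dict.getD, hget]
      rw [hAval]
      -- B side
      simp only [List.getElem_map, PySem.List.getElem_pyRange_one]
      simp
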